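-- pv_equiv track=rewrite | github.com/CTDave001/nullscan | backend/app/strix_runner.py | _get_friendly_agent_name
-- ===== SOURCE A (Python) =====
-- def _get_friendly_agent_name(agent_id: str, task: str, index: int) -> str:
--     """Generate a user-friendly agent name based on task or index."""
--     task_lower = task.lower() if task else ""
--
--     # Try to infer role from task description
--     if any(x in task_lower for x in ["recon", "discover", "enumerate", "subdomain", "dns"]):
--         return "Recon Agent"
--     if any(x in task_lower for x in ["sql", "injection", "database"]):
--         return "SQLi Scanner"
--     if any(x in task_lower for x in ["xss", "script", "cross-site"]):
--         return "XSS Scanner"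
--     if any(x in task_lower for x in ["auth", "login", "session", "password"]):
--         return "Auth Tester"
--     if any(x in task_lower for x in ["api", "endpoint", "rest"]):
--         return "API Prober"
--     if any(x in task_lower for x in ["ssrf", "request forgery"]):
--         return "SSRF Scanner"
--     if any(x in task_lower for x in ["path", "traversal", "directory"]):
--         return "Path Traversal"
--     if any(x in task_lower for x in ["header", "security header", "cors"]):
--         return "Header Analyzer"
--     if any(x in task_lower for x in ["port", "scan", "service"]):
--         return "Port Scanner"
--     if any(x in task_lower for x in ["browser", "click", "form"]):
--         return "Browser Agent"
--
--     # Fallback to generic numbered names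
--     names = ["Alpha", "Bravo", "Charlie", "Delta", "Echo", "Foxtrot", "Golf", "Hotel"]
--     return f"Agent {names[index % len(names)]}"
-- ===== SOURCE B (Python) =====
-- # Flat keyword index scanned with str.find + min-rule-index selection, instead of
-- # A's ordered chain of `any(x in ...)` branches.  Correct because branch i of A
-- # wins iff some keyword of rule i occurs in the text and no keyword of an
-- # earlier rule does, i.e. iff i is the minimal rule index with an occurring
-- # keyword -- and `t.find(kw) != -1` is exactly `kw in t`.
--
-- FLAT_KEYWORDS = [
--     ("recon", 0), ("discover", 0), ("enumerate", 0), ("subdomain", 0), ("dns", 0),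
--     ("sql", 1), ("injection", 1), ("database", 1),
--     ("xss", 2), ("script", 2), ("cross-site", 2),
--     ("auth", 3), ("login", 3), ("session", 3), ("password", 3),
--     ("api", 4), ("endpoint", 4), ("rest", 4),
--     ("ssrf", 5), ("request forgery", 5),
--     ("path", 6), ("traversal", 6), ("directory", 6),
--     ("header", 7), ("security header", 7), ("cors", 7),
--     ("port", 8), ("scan", 8), ("service", 8),
--     ("browser", 9), ("click", 9), ("form", 9),
-- ]
--
-- RULE_NAMES = [
--     "Recon Agent", "SQLi Scanner", "XSS Scanner", "Auth Tester", "API Prober",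
--     "SSRF Scanner", "Path Traversal", "Header Analyzer", "Port Scanner", "Browser Agent",
-- ]
--
-- FALLBACK_NAMES = ["Alpha", "Bravo", "Charlie", "Delta", "Echo", "Foxtrot", "Golf", "Hotel"]
--
--
-- def _get_friendly_agent_name(agent_id: str, task: str, index: int) -> str:
--     t = task.lower()
--     best = -1
--     for kw, rid in FLAT_KEYWORDS:
--         if t.find(kw) != -1 and (best == -1 or rid < best):
--             best = rid
--     if best != -1:
--         return RULE_NAMES[best]
--     return "Agent " + FALLBACK_NAMES[index % len(FALLBACK_NAMES)]
-- ===== Notes on version B (the rewrite author's own statement) =====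
-- stated objective: alternative
-- what changed: Replaces the ordered chain of any(x in t) branches by a flat (keyword, rule-index) table scanned once with str.find, keeping the minimal matched rule index and mapping it to a name; precedence comes from min instead of branch order.
import Mathlib
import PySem

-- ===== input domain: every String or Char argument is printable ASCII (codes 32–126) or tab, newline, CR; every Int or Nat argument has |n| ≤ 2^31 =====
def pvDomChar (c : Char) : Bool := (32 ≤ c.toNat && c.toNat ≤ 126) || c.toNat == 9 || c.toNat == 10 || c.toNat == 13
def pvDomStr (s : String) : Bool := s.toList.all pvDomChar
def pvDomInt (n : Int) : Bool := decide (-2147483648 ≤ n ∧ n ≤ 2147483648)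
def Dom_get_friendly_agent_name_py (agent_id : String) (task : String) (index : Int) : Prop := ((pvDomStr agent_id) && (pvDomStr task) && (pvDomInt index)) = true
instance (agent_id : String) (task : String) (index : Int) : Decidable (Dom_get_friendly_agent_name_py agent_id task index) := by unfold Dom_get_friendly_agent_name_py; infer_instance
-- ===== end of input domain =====

-- B replaces A's ordered chain of `any(x in t)` branches by a flat keyword index
-- scanned once with str.find, selecting the minimal matched rule index (objective: alternative decomposition).

-- ===== PORT A =====
-- Port of A: literal chain of keyword-substring branches, then the numbered fallback.
def get_friendly_agent_name_py (agent_id : String) (task : String) (index : Int) : String :=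
  let task_lower := if task = "" then "" else PySem.Str.lower task
  if ["recon", "discover", "enumerate", "subdomain", "dns"].any (fun x => PySem.Str.isIn x task_lower) then "Recon Agent"
  else if ["sql", "injection", "database"].any (fun x => PySem.Str.isIn x task_lower) then "SQLi Scanner"
  else if ["xss", "script", "cross-site"].any (fun x => PySem.Str.isIn x task_lower) then "XSS Scanner"
  else if ["auth", "login", "session", "password"].any (fun x => PySem.Str.isIn x task_lower) then "Auth Tester"
  else if ["api", "endpoint", "rest"].any (fun x => PySem.Str.isIn x task_lower) then "API Prober"
  else if ["ssrf", "request forgery"].any (fun x => PySem.Str.isIn x task_lower) then "SSRF Scanner"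
  else if ["path", "traversal", "directory"].any (fun x => PySem.Str.isIn x task_lower) then "Path Traversal"
  else if ["header", "security header", "cors"].any (fun x => PySem.Str.isIn x task_lower) then "Header Analyzer"
  else if ["port", "scan", "service"].any (fun x => PySem.Str.isIn x task_lower) then "Port Scanner"
  else if ["browser", "click", "form"].any (fun x => PySem.Str.isIn x task_lower) then "Browser Agent"
  else
    let names := ["Alpha", "Bravo", "Charlie", "Delta", "Echo", "Foxtrot", "Golf", "Hotel"]
    "Agent " ++ names.getD (PySem.Int.mod index 8).toNat ""

-- ===== PORT B =====
-- Port of B (Source B): flat (keyword, rule-index) list, one fold keeping the minimal matched rule index.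
def pvFlatKeywords : List (String × Nat) :=
  [("recon", 0), ("discover", 0), ("enumerate", 0), ("subdomain", 0), ("dns", 0),
   ("sql", 1), ("injection", 1), ("database", 1),
   ("xss", 2), ("script", 2), ("cross-site", 2),
   ("auth", 3), ("login", 3), ("session", 3), ("password", 3),
   ("api", 4), ("endpoint", 4), ("rest", 4),
   ("ssrf", 5), ("request forgery", 5),
   ("path", 6), ("traversal", 6), ("directory", 6),
   ("header", 7), ("security header", 7), ("cors", 7),
   ("port", 8), ("scan", 8), ("service", 8),
   ("browser", 9), ("click", 9), ("form", 9)]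

def pvRuleNames : List String :=
  ["Recon Agent", "SQLi Scanner", "XSS Scanner", "Auth Tester", "API Prober",
   "SSRF Scanner", "Path Traversal", "Header Analyzer", "Port Scanner", "Browser Agent"]

def pvFallbackNames : List String := ["Alpha", "Bravo", "Charlie", "Delta", "Echo", "Foxtrot", "Golf", "Hotel"]

-- the loop body: `if t.find(kw) != -1 and (best == -1 or rid < best): best = rid`
def pvStep (t : String) (best : Int) (e : String × Nat) : Int :=
  if (PySem.Str.find t e.1 != -1) && (best == -1 || ((e.2 : Int) < best : Bool)) then (e.2 : Int) else best

def get_friendly_agent_name_py_alt (agent_id : String) (task : String) (index : Int) : String :=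
  let t := PySem.Str.lower task
  let best := pvFlatKeywords.foldl (pvStep t) (-1)
  if best != -1 then pvRuleNames.getD best.toNat ""
  else "Agent " ++ pvFallbackNames.getD (PySem.Int.mod index 8).toNat ""

-- ===== PRECONDITION & SPEC =====
def Spec_get_friendly_agent_name_py (agent_id : String) (task : String) (index : Int) (out : String) : Prop := out = get_friendly_agent_name_py_alt agent_id task index
instance (agent_id : String) (task : String) (index : Int) (out : String) : Decidable (Spec_get_friendly_agent_name_py agent_id task index out) := by unfold Spec_get_friendly_agent_name_py; infer_instance

-- ===== CLAIM (what is proved, stated in full; the proofs are below) =====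
def Claim_equal_get_friendly_agent_name_py : Prop := ∀ (agent_id : String) (task : String) (index : Int), Dom_get_friendly_agent_name_py agent_id task index → Spec_get_friendly_agent_name_py agent_id task index (get_friendly_agent_name_py agent_id task index)

-- ===== LEMMAS AND PROOFS =====

-- `t.find(kw) != -1` is exactly `kw in t`
theorem pv_find_bool (t kw : String) : (PySem.Str.find t kw != -1) = PySem.Str.isIn kw t := by
  by_cases h : kw.toList <:+: t.toList
  · have h1 : PySem.Str.find t kw ≠ -1 := (PySem.Str.find_ne_neg_one_iff t kw).mpr h
    have h2 : PySem.Str.isIn kw t = true := (PySem.Str.isIn_iff_infix kw t).mpr h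
    rw [h2]
    exact bne_iff_ne.mpr h1
  · have h1 : PySem.Str.find t kw = -1 := by
      by_contra hc
      exact h ((PySem.Str.find_ne_neg_one_iff t kw).mp hc)
    have h2 : PySem.Str.isIn kw t = false :=
      Bool.eq_false_iff.mpr fun hh => h ((PySem.Str.isIn_iff_infix kw t).mp hh)
    rw [h2, h1]
    rfl

-- folding the step over a group of keywords that all carry the same rule index r
theorem pv_group (t : String) (r : Nat) (l : List (String × Nat)) (hl : ∀ e ∈ l, e.2 = r) (b : Int) :
    l.foldl (pvStep t) b =
      if (l.any fun e => PySem.Str.isIn e.1 t) && (b == -1 || ((r : Int) < b : Bool)) then (r : Int) else b := by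
  induction l generalizing b with
  | nil => simp
  | cons e l ih =>
    have he : e.2 = r := hl e (List.mem_cons_self ..)
    have hl' : ∀ e' ∈ l, e'.2 = r := fun e' h' => hl e' (List.mem_cons_of_mem _ h')
    simp only [List.foldl_cons, List.any_cons]
    rw [ih hl']
    simp only [pvStep, pv_find_bool, he]
    by_cases hm : PySem.Str.isIn e.1 t = true
    · simp only [hm, Bool.true_and, Bool.true_or]
      by_cases hc : (b == -1 || ((r : Int) < b : Bool)) = true
      · simp only [hc, if_true]
        have hz : (((r : Int)) == -1 || (((r : Int) < (r : Int)) : Bool)) = false := by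
          simp only [Bool.or_eq_false_iff, beq_eq_false_iff_ne, ne_eq, decide_eq_false_iff_not]
          omega
        rw [hz]
        simp
      · simp only [Bool.not_eq_true] at hc
        simp [hc]
    · simp only [Bool.not_eq_true] at hm
      simp only [hm, Bool.false_and, Bool.false_or, Bool.false_eq_true, if_false]

-- a group whose rule index cannot improve the current best leaves it unchanged
theorem pv_stay (t : String) (r : Nat) (l : List (String × Nat)) (hl : ∀ e ∈ l, e.2 = r) (b : Int)
    (hb : (b == -1 || ((r : Int) < b : Bool)) = false) : l.foldl (pvStep t) b = b := by
  rw [pv_group t r l hl b, hb]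
  simp

set_option maxHeartbeats 1000000 in
theorem pv_eq (agent_id task : String) (index : Int) :
    get_friendly_agent_name_py agent_id task index = get_friendly_agent_name_py_alt agent_id task index := by
  unfold get_friendly_agent_name_py get_friendly_agent_name_py_alt
  have hguard : (if task = "" then "" else PySem.Str.lower task) = PySem.Str.lower task := by
    split_ifs with h
    · subst h; decide
    · rfl
  rw [hguard]
  generalize PySem.Str.lower task = tl
  have hsplit : pvFlatKeywords =
      [("recon", 0), ("discover", 0), ("enumerate", 0), ("subdomain", 0), ("dns", 0)] ++
      ([("sql", 1), ("injection", 1), ("database", 1)] ++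
      ([("xss", 2), ("script", 2), ("cross-site", 2)] ++
      ([("auth", 3), ("login", 3), ("session", 3), ("password", 3)] ++
      ([("api", 4), ("endpoint", 4), ("rest", 4)] ++
      ([("ssrf", 5), ("request forgery", 5)] ++
      ([("path", 6), ("traversal", 6), ("directory", 6)] ++
      ([("header", 7), ("security header", 7), ("cors", 7)] ++
      ([("port", 8), ("scan", 8), ("service", 8)] ++
      ([("browser", 9), ("click", 9), ("form", 9)]))))))))) := rfl
  rw [hsplit]
  simp only [List.foldl_append]
  have ha0 : (["recon", "discover", "enumerate", "subdomain", "dns"].any fun x => PySem.Str.isIn x tl) = (([("recon", 0), ("discover", 0), ("enumerate", 0), ("subdomain", 0), ("dns", 0)] : List (String × Nat)).any fun e => PySem.Str.isIn e.1 tl) := by simp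
  have ha1 : (["sql", "injection", "database"].any fun x => PySem.Str.isIn x tl) = (([("sql", 1), ("injection", 1), ("database", 1)] : List (String × Nat)).any fun e => PySem.Str.isIn e.1 tl) := by simp
  have ha2 : (["xss", "script", "cross-site"].any fun x => PySem.Str.isIn x tl) = (([("xss", 2), ("script", 2), ("cross-site", 2)] : List (String × Nat)).any fun e => PySem.Str.isIn e.1 tl) := by simp
  have ha3 : (["auth", "login", "session", "password"].any fun x => PySem.Str.isIn x tl) = (([("auth", 3), ("login", 3), ("session", 3), ("password", 3)] : List (String × Nat)).any fun e => PySem.Str.isIn e.1 tl) := by simp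
  have ha4 : (["api", "endpoint", "rest"].any fun x => PySem.Str.isIn x tl) = (([("api", 4), ("endpoint", 4), ("rest", 4)] : List (String × Nat)).any fun e => PySem.Str.isIn e.1 tl) := by simp
  have ha5 : (["ssrf", "request forgery"].any fun x => PySem.Str.isIn x tl) = (([("ssrf", 5), ("request forgery", 5)] : List (String × Nat)).any fun e => PySem.Str.isIn e.1 tl) := by simp
  have ha6 : (["path", "traversal", "directory"].any fun x => PySem.Str.isIn x tl) = (([("path", 6), ("traversal", 6), ("directory", 6)] : List (String × Nat)).any fun e => PySem.Str.isIn e.1 tl) := by simp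
  have ha7 : (["header", "security header", "cors"].any fun x => PySem.Str.isIn x tl) = (([("header", 7), ("security header", 7), ("cors", 7)] : List (String × Nat)).any fun e => PySem.Str.isIn e.1 tl) := by simp
  have ha8 : (["port", "scan", "service"].any fun x => PySem.Str.isIn x tl) = (([("port", 8), ("scan", 8), ("service", 8)] : List (String × Nat)).any fun e => PySem.Str.isIn e.1 tl) := by simp
  have ha9 : (["browser", "click", "form"].any fun x => PySem.Str.isIn x tl) = (([("browser", 9), ("click", 9), ("form", 9)] : List (String × Nat)).any fun e => PySem.Str.isIn e.1 tl) := by simp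
  rw [ha0, ha1, ha2, ha3, ha4, ha5, ha6, ha7, ha8, ha9]
  by_cases h0 : (([("recon", 0), ("discover", 0), ("enumerate", 0), ("subdomain", 0), ("dns", 0)] : List (String × Nat)).any fun e => PySem.Str.isIn e.1 tl) = true
  · rw [if_pos h0, pv_group tl 0 [("recon", 0), ("discover", 0), ("enumerate", 0), ("subdomain", 0), ("dns", 0)] (by decide), h0]
    rw [show (if (true && (((-1 : Int)) == -1 || decide ((((0 : Nat)) : Int) < -1))) = true then (((0 : Nat)) : Int) else -1) = (((0 : Nat)) : Int) from by decide]
    rw [pv_stay tl 1 [("sql", 1), ("injection", 1), ("database", 1)] (by decide) (((0 : Nat)) : Int) (by decide)]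
    rw [pv_stay tl 2 [("xss", 2), ("script", 2), ("cross-site", 2)] (by decide) (((0 : Nat)) : Int) (by decide)]
    rw [pv_stay tl 3 [("auth", 3), ("login", 3), ("session", 3), ("password", 3)] (by decide) (((0 : Nat)) : Int) (by decide)]
    rw [pv_stay tl 4 [("api", 4), ("endpoint", 4), ("rest", 4)] (by decide) (((0 : Nat)) : Int) (by decide)]
    rw [pv_stay tl 5 [("ssrf", 5), ("request forgery", 5)] (by decide) (((0 : Nat)) : Int) (by decide)]
    rw [pv_stay tl 6 [("path", 6), ("traversal", 6), ("directory", 6)] (by decide) (((0 : Nat)) : Int) (by decide)]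
    rw [pv_stay tl 7 [("header", 7), ("security header", 7), ("cors", 7)] (by decide) (((0 : Nat)) : Int) (by decide)]
    rw [pv_stay tl 8 [("port", 8), ("scan", 8), ("service", 8)] (by decide) (((0 : Nat)) : Int) (by decide)]
    rw [pv_stay tl 9 [("browser", 9), ("click", 9), ("form", 9)] (by decide) (((0 : Nat)) : Int) (by decide)]
    rw [show ((((0 : Nat)) : Int) != -1) = true from by decide, if_pos rfl]
    decide
  rw [if_neg h0, pv_group tl 0 [("recon", 0), ("discover", 0), ("enumerate", 0), ("subdomain", 0), ("dns", 0)] (by decide)]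
  rw [Bool.not_eq_true] at h0
  rw [h0]
  simp only [Bool.false_and, Bool.false_eq_true, if_false]
  by_cases h1 : (([("sql", 1), ("injection", 1), ("database", 1)] : List (String × Nat)).any fun e => PySem.Str.isIn e.1 tl) = true
  · rw [if_pos h1, pv_group tl 1 [("sql", 1), ("injection", 1), ("database", 1)] (by decide), h1]
    rw [show (if (true && (((-1 : Int)) == -1 || decide ((((1 : Nat)) : Int) < -1))) = true then (((1 : Nat)) : Int) else -1) = (((1 : Nat)) : Int) from by decide]
    rw [pv_stay tl 2 [("xss", 2), ("script", 2), ("cross-site", 2)] (by decide) (((1 : Nat)) : Int) (by decide)]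
    rw [pv_stay tl 3 [("auth", 3), ("login", 3), ("session", 3), ("password", 3)] (by decide) (((1 : Nat)) : Int) (by decide)]
    rw [pv_stay tl 4 [("api", 4), ("endpoint", 4), ("rest", 4)] (by decide) (((1 : Nat)) : Int) (by decide)]
    rw [pv_stay tl 5 [("ssrf", 5), ("request forgery", 5)] (by decide) (((1 : Nat)) : Int) (by decide)]
    rw [pv_stay tl 6 [("path", 6), ("traversal", 6), ("directory", 6)] (by decide) (((1 : Nat)) : Int) (by decide)]
    rw [pv_stay tl 7 [("header", 7), ("security header", 7), ("cors", 7)] (by decide) (((1 : Nat)) : Int) (by decide)]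
    rw [pv_stay tl 8 [("port", 8), ("scan", 8), ("service", 8)] (by decide) (((1 : Nat)) : Int) (by decide)]
    rw [pv_stay tl 9 [("browser", 9), ("click", 9), ("form", 9)] (by decide) (((1 : Nat)) : Int) (by decide)]
    rw [show ((((1 : Nat)) : Int) != -1) = true from by decide, if_pos rfl]
    decide
  rw [if_neg h1, pv_group tl 1 [("sql", 1), ("injection", 1), ("database", 1)] (by decide)]
  rw [Bool.not_eq_true] at h1
  rw [h1]
  simp only [Bool.false_and, Bool.false_eq_true, if_false]
  by_cases h2 : (([("xss", 2), ("script", 2), ("cross-site", 2)] : List (String × Nat)).any fun e => PySem.Str.isIn e.1 tl) = true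
  · rw [if_pos h2, pv_group tl 2 [("xss", 2), ("script", 2), ("cross-site", 2)] (by decide), h2]
    rw [show (if (true && (((-1 : Int)) == -1 || decide ((((2 : Nat)) : Int) < -1))) = true then (((2 : Nat)) : Int) else -1) = (((2 : Nat)) : Int) from by decide]
    rw [pv_stay tl 3 [("auth", 3), ("login", 3), ("session", 3), ("password", 3)] (by decide) (((2 : Nat)) : Int) (by decide)]
    rw [pv_stay tl 4 [("api", 4), ("endpoint", 4), ("rest", 4)] (by decide) (((2 : Nat)) : Int) (by decide)]
    rw [pv_stay tl 5 [("ssrf", 5), ("request forgery", 5)] (by decide) (((2 : Nat)) : Int) (by decide)]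
    rw [pv_stay tl 6 [("path", 6), ("traversal", 6), ("directory", 6)] (by decide) (((2 : Nat)) : Int) (by decide)]
    rw [pv_stay tl 7 [("header", 7), ("security header", 7), ("cors", 7)] (by decide) (((2 : Nat)) : Int) (by decide)]
    rw [pv_stay tl 8 [("port", 8), ("scan", 8), ("service", 8)] (by decide) (((2 : Nat)) : Int) (by decide)]
    rw [pv_stay tl 9 [("browser", 9), ("click", 9), ("form", 9)] (by decide) (((2 : Nat)) : Int) (by decide)]
    rw [show ((((2 : Nat)) : Int) != -1) = true from by decide, if_pos rfl]
    decide
  rw [if_neg h2, pv_group tl 2 [("xss", 2), ("script", 2), ("cross-site", 2)] (by decide)]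
  rw [Bool.not_eq_true] at h2
  rw [h2]
  simp only [Bool.false_and, Bool.false_eq_true, if_false]
  by_cases h3 : (([("auth", 3), ("login", 3), ("session", 3), ("password", 3)] : List (String × Nat)).any fun e => PySem.Str.isIn e.1 tl) = true
  · rw [if_pos h3, pv_group tl 3 [("auth", 3), ("login", 3), ("session", 3), ("password", 3)] (by decide), h3]
    rw [show (if (true && (((-1 : Int)) == -1 || decide ((((3 : Nat)) : Int) < -1))) = true then (((3 : Nat)) : Int) else -1) = (((3 : Nat)) : Int) from by decide]
    rw [pv_stay tl 4 [("api", 4), ("endpoint", 4), ("rest", 4)] (by decide) (((3 : Nat)) : Int) (by decide)]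
    rw [pv_stay tl 5 [("ssrf", 5), ("request forgery", 5)] (by decide) (((3 : Nat)) : Int) (by decide)]
    rw [pv_stay tl 6 [("path", 6), ("traversal", 6), ("directory", 6)] (by decide) (((3 : Nat)) : Int) (by decide)]
    rw [pv_stay tl 7 [("header", 7), ("security header", 7), ("cors", 7)] (by decide) (((3 : Nat)) : Int) (by decide)]
    rw [pv_stay tl 8 [("port", 8), ("scan", 8), ("service", 8)] (by decide) (((3 : Nat)) : Int) (by decide)]
    rw [pv_stay tl 9 [("browser", 9), ("click", 9), ("form", 9)] (by decide) (((3 : Nat)) : Int) (by decide)]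
    rw [show ((((3 : Nat)) : Int) != -1) = true from by decide, if_pos rfl]
    decide
  rw [if_neg h3, pv_group tl 3 [("auth", 3), ("login", 3), ("session", 3), ("password", 3)] (by decide)]
  rw [Bool.not_eq_true] at h3
  rw [h3]
  simp only [Bool.false_and, Bool.false_eq_true, if_false]
  by_cases h4 : (([("api", 4), ("endpoint", 4), ("rest", 4)] : List (String × Nat)).any fun e => PySem.Str.isIn e.1 tl) = true
  · rw [if_pos h4, pv_group tl 4 [("api", 4), ("endpoint", 4), ("rest", 4)] (by decide), h4]
    rw [show (if (true && (((-1 : Int)) == -1 || decide ((((4 : Nat)) : Int) < -1))) = true then (((4 : Nat)) : Int) else -1) = (((4 : Nat)) : Int) from by decide]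
    rw [pv_stay tl 5 [("ssrf", 5), ("request forgery", 5)] (by decide) (((4 : Nat)) : Int) (by decide)]
    rw [pv_stay tl 6 [("path", 6), ("traversal", 6), ("directory", 6)] (by decide) (((4 : Nat)) : Int) (by decide)]
    rw [pv_stay tl 7 [("header", 7), ("security header", 7), ("cors", 7)] (by decide) (((4 : Nat)) : Int) (by decide)]
    rw [pv_stay tl 8 [("port", 8), ("scan", 8), ("service", 8)] (by decide) (((4 : Nat)) : Int) (by decide)]
    rw [pv_stay tl 9 [("browser", 9), ("click", 9), ("form", 9)] (by decide) (((4 : Nat)) : Int) (by decide)]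
    rw [show ((((4 : Nat)) : Int) != -1) = true from by decide, if_pos rfl]
    decide
  rw [if_neg h4, pv_group tl 4 [("api", 4), ("endpoint", 4), ("rest", 4)] (by decide)]
  rw [Bool.not_eq_true] at h4
  rw [h4]
  simp only [Bool.false_and, Bool.false_eq_true, if_false]
  by_cases h5 : (([("ssrf", 5), ("request forgery", 5)] : List (String × Nat)).any fun e => PySem.Str.isIn e.1 tl) = true
  · rw [if_pos h5, pv_group tl 5 [("ssrf", 5), ("request forgery", 5)] (by decide), h5]
    rw [show (if (true && (((-1 : Int)) == -1 || decide ((((5 : Nat)) : Int) < -1))) = true then (((5 : Nat)) : Int) else -1) = (((5 : Nat)) : Int) from by decide]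
    rw [pv_stay tl 6 [("path", 6), ("traversal", 6), ("directory", 6)] (by decide) (((5 : Nat)) : Int) (by decide)]
    rw [pv_stay tl 7 [("header", 7), ("security header", 7), ("cors", 7)] (by decide) (((5 : Nat)) : Int) (by decide)]
    rw [pv_stay tl 8 [("port", 8), ("scan", 8), ("service", 8)] (by decide) (((5 : Nat)) : Int) (by decide)]
    rw [pv_stay tl 9 [("browser", 9), ("click", 9), ("form", 9)] (by decide) (((5 : Nat)) : Int) (by decide)]
    rw [show ((((5 : Nat)) : Int) != -1) = true from by decide, if_pos rfl]
    decide
  rw [if_neg h5, pv_group tl 5 [("ssrf", 5), ("request forgery", 5)] (by decide)]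
  rw [Bool.not_eq_true] at h5
  rw [h5]
  simp only [Bool.false_and, Bool.false_eq_true, if_false]
  by_cases h6 : (([("path", 6), ("traversal", 6), ("directory", 6)] : List (String × Nat)).any fun e => PySem.Str.isIn e.1 tl) = true
  · rw [if_pos h6, pv_group tl 6 [("path", 6), ("traversal", 6), ("directory", 6)] (by decide), h6]
    rw [show (if (true && (((-1 : Int)) == -1 || decide ((((6 : Nat)) : Int) < -1))) = true then (((6 : Nat)) : Int) else -1) = (((6 : Nat)) : Int) from by decide]
    rw [pv_stay tl 7 [("header", 7), ("security header", 7), ("cors", 7)] (by decide) (((6 : Nat)) : Int) (by decide)]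
    rw [pv_stay tl 8 [("port", 8), ("scan", 8), ("service", 8)] (by decide) (((6 : Nat)) : Int) (by decide)]
    rw [pv_stay tl 9 [("browser", 9), ("click", 9), ("form", 9)] (by decide) (((6 : Nat)) : Int) (by decide)]
    rw [show ((((6 : Nat)) : Int) != -1) = true from by decide, if_pos rfl]
    decide
  rw [if_neg h6, pv_group tl 6 [("path", 6), ("traversal", 6), ("directory", 6)] (by decide)]
  rw [Bool.not_eq_true] at h6
  rw [h6]
  simp only [Bool.false_and, Bool.false_eq_true, if_false]
  by_cases h7 : (([("header", 7), ("security header", 7), ("cors", 7)] : List (String × Nat)).any fun e => PySem.Str.isIn e.1 tl) = true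
  · rw [if_pos h7, pv_group tl 7 [("header", 7), ("security header", 7), ("cors", 7)] (by decide), h7]
    rw [show (if (true && (((-1 : Int)) == -1 || decide ((((7 : Nat)) : Int) < -1))) = true then (((7 : Nat)) : Int) else -1) = (((7 : Nat)) : Int) from by decide]
    rw [pv_stay tl 8 [("port", 8), ("scan", 8), ("service", 8)] (by decide) (((7 : Nat)) : Int) (by decide)]
    rw [pv_stay tl 9 [("browser", 9), ("click", 9), ("form", 9)] (by decide) (((7 : Nat)) : Int) (by decide)]
    rw [show ((((7 : Nat)) : Int) != -1) = true from by decide, if_pos rfl]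
    decide
  rw [if_neg h7, pv_group tl 7 [("header", 7), ("security header", 7), ("cors", 7)] (by decide)]
  rw [Bool.not_eq_true] at h7
  rw [h7]
  simp only [Bool.false_and, Bool.false_eq_true, if_false]
  by_cases h8 : (([("port", 8), ("scan", 8), ("service", 8)] : List (String × Nat)).any fun e => PySem.Str.isIn e.1 tl) = true
  · rw [if_pos h8, pv_group tl 8 [("port", 8), ("scan", 8), ("service", 8)] (by decide), h8]
    rw [show (if (true && (((-1 : Int)) == -1 || decide ((((8 : Nat)) : Int) < -1))) = true then (((8 : Nat)) : Int) else -1) = (((8 : Nat)) : Int) from by decide]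
    rw [pv_stay tl 9 [("browser", 9), ("click", 9), ("form", 9)] (by decide) (((8 : Nat)) : Int) (by decide)]
    rw [show ((((8 : Nat)) : Int) != -1) = true from by decide, if_pos rfl]
    decide
  rw [if_neg h8, pv_group tl 8 [("port", 8), ("scan", 8), ("service", 8)] (by decide)]
  rw [Bool.not_eq_true] at h8
  rw [h8]
  simp only [Bool.false_and, Bool.false_eq_true, if_false]
  by_cases h9 : (([("browser", 9), ("click", 9), ("form", 9)] : List (String × Nat)).any fun e => PySem.Str.isIn e.1 tl) = true
  · rw [if_pos h9, pv_group tl 9 [("browser", 9), ("click", 9), ("form", 9)] (by decide), h9]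
    rw [show (if (true && (((-1 : Int)) == -1 || decide ((((9 : Nat)) : Int) < -1))) = true then (((9 : Nat)) : Int) else -1) = (((9 : Nat)) : Int) from by decide]
    rw [show ((((9 : Nat)) : Int) != -1) = true from by decide, if_pos rfl]
    decide
  rw [if_neg h9, pv_group tl 9 [("browser", 9), ("click", 9), ("form", 9)] (by decide)]
  rw [Bool.not_eq_true] at h9
  rw [h9]
  simp only [Bool.false_and, Bool.false_eq_true, if_false]
  rw [show (((-1 : Int)) != -1) = false from by decide, if_neg (by simp)]
  rfl

-- ===== VERDICT (by name: the statement is the Claim_ definition above) =====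
theorem get_friendly_agent_name_py_spec : Claim_equal_get_friendly_agent_name_py := by
  intro a t i _
  exact pv_eq a t i
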